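-- pv_equiv track=rewrite | github.com/Shriyanshu2004/Svarachandas | utils/audio_engine.py | stretch_vowels
-- ===== SOURCE A (Python) =====
-- def stretch_vowels(text):
--     replacements = {
--         "Om": "Oom",
--         "Namah": "Naamah",
--         "Shivaya": "Shivaaya"
--     }
--     for k, v in replacements.items():
--         text = text.replace(k, v)
--     return text
-- ===== SOURCE B (Python) =====
-- def stretch_vowels(text):
--     table = (("Om", "Oom"), ("Namah", "Naamah"), ("Shivaya", "Shivaaya"))
--     out = []
--     i = 0
--     n = len(text)
--     while i < n:
--         for k, v in table:
--             if text.startswith(k, i):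
--                 out.append(v)
--                 i += len(k)
--                 break
--         else:
--             out.append(text[i])
--             i += 1
--     return "".join(out)
-- ===== Notes on version B (the rewrite author's own statement) =====
-- stated objective: alternative
-- what changed: Replaces three sequential full-string replace passes with a single left-to-right table-driven scan that matches any key at the current position and emits its stretched form (valid since no key overlaps another and no value reintroduces a key).
import Mathlib
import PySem

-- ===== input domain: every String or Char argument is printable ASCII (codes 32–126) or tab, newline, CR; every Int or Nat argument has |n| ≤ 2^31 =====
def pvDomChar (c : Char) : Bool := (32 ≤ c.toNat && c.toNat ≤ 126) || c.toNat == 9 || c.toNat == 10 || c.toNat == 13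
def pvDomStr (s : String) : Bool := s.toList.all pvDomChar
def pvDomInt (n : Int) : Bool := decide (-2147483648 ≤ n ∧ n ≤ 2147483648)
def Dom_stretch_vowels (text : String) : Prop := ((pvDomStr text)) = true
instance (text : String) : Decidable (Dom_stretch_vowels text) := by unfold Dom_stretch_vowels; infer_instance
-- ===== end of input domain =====

set_option maxRecDepth 8000


-- B replaces A's three sequential full-string replace passes with one left-to-right
-- table-driven scan matching any key at the current position (alternative; same result).

-- ===== PORT A =====
-- A: build the replacements dict, then for each (k, v) in it do text = text.replace(k, v).
def stretch_vowels (text : String) : String :=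
  let replacements : PySem.Dict String String :=
    PySem.Dict.mk [("Om", "Oom"), ("Namah", "Naamah"), ("Shivaya", "Shivaaya")]
  replacements.items.foldl (fun t kv => PySem.Str.replace t kv.1 kv.2) text

-- ===== PORT B =====
-- B's single pass: at each position try the keys in dict order; on a match emit the
-- stretched value and skip the key, else emit the character and advance by one.
def svScan : List Char → List Char
  | [] => []
  | c :: t =>
    if List.isPrefixOf ['O', 'm'] (c :: t) then
      ['O', 'o', 'm'] ++ svScan (t.drop 1)
    else if List.isPrefixOf ['N', 'a', 'm', 'a', 'h'] (c :: t) then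
      ['N', 'a', 'a', 'm', 'a', 'h'] ++ svScan (t.drop 4)
    else if List.isPrefixOf ['S', 'h', 'i', 'v', 'a', 'y', 'a'] (c :: t) then
      ['S', 'h', 'i', 'v', 'a', 'a', 'y', 'a'] ++ svScan (t.drop 6)
    else c :: svScan t
termination_by l => l.length
decreasing_by all_goals simp [List.length_drop]

def stretch_vowels_alt (text : String) : String := String.ofList (svScan text.toList)

-- ===== PRECONDITION & SPEC =====
def Spec_stretch_vowels (text : String) (out : String) : Prop := out = stretch_vowels_alt text
instance (text : String) (out : String) : Decidable (Spec_stretch_vowels text out) := by unfold Spec_stretch_vowels; infer_instance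

-- ===== CLAIM (what is proved, stated in full; the proofs are below) =====
def Claim_equal_stretch_vowels : Prop := ∀ (text : String), Dom_stretch_vowels text → Spec_stretch_vowels text (stretch_vowels text)

-- ===== LEMMAS AND PROOFS =====

-- single-key scan: what one Python str.replace pass computes
def svRep (k v : List Char) : List Char → List Char
  | [] => []
  | c :: t =>
    if List.isPrefixOf k (c :: t) then v ++ svRep k v (t.drop (k.length - 1))
    else c :: svRep k v t
termination_by l => l.length
decreasing_by all_goals simp [List.length_drop]

theorem svRep_go (old new : List Char) (hold : old ≠ []) :
    ∀ fuel l acc, l.length ≤ fuel →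
      PySem.Chars.replace.go old new fuel l acc = acc.reverse ++ svRep old new l := by
  intro fuel
  induction fuel with
  | zero =>
    intro l acc hl
    have : l = [] := by cases l <;> simp_all
    subst this
    simp [PySem.Chars.replace.go, svRep]
  | succ n ih =>
    intro l acc hl
    cases l with
    | nil => simp [PySem.Chars.replace.go, svRep]
    | cons c t =>
      obtain ⟨h, old', rfl⟩ : ∃ h old', old = h :: old' := by
        cases old with | nil => exact absurd rfl hold | cons a b => exact ⟨a, b, rfl⟩
      rw [PySem.Chars.replace.go]
      by_cases hp : List.isPrefixOf (h :: old') (c :: t) = true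
      · have hlen : old' <+: t := by
          have := (List.isPrefixOf_iff_prefix.mp hp)
          rw [List.cons_prefix_cons] at this
          exact this.2
        rw [if_pos hp]
        have hdrop : List.drop (h :: old').length (c :: t) = t.drop ((h :: old').length - 1) := by
          simp [List.length_cons]
        rw [hdrop, ih]
        · rw [svRep, if_pos hp]
          simp
        · have := hlen.length_le
          simp only [List.length_drop]
          simp at hl ⊢
          omega
      · rw [if_neg hp, ih]
        · rw [svRep, if_neg hp]
          simp
        · simp at hl; omega

theorem svRep_eq_replace (old new s : List Char) (hold : old ≠ []) :
    PySem.Chars.replace s old new = svRep old new s := by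
  rw [PySem.Chars.replace, if_neg (by simpa [List.isEmpty_iff] using hold)]
  simpa using svRep_go old new hold s.length s [] le_rfl

-- a pass with key h::k' walks over any block whose characters all differ from h
theorem svRep_append (h : Char) (k' v p x : List Char) (hp : ∀ c ∈ p, c ≠ h) :
    svRep (h :: k') v (p ++ x) = p ++ svRep (h :: k') v x := by
  induction p with
  | nil => simp
  | cons a p' ih =>
    have ha : a ≠ h := hp a (by simp)
    rw [List.cons_append, svRep, if_neg]
    · rw [ih (fun c hc => hp c (by simp [hc]))]
      simp
    · intro hpre
      have := (List.isPrefixOf_iff_prefix.mp hpre)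
      rw [List.cons_prefix_cons] at this
      exact ha this.1.symm

-- a pass whose key and value both start with h cannot create a new occurrence of a
-- pattern q that avoids h
theorem svRep_prefix_reflect (h : Char) (k' v' : List Char) (q : List Char)
    (hq : ∀ c ∈ q, c ≠ h) :
    ∀ t, q <+: svRep (h :: k') (h :: v') t → q <+: t := by
  induction q with
  | nil => intro t _; exact List.nil_prefix
  | cons a q₂ ih =>
    have ha : a ≠ h := hq a (by simp)
    intro t hpre
    cases t with
    | nil =>
      rw [svRep] at hpre
      exact absurd hpre.length_le (by simp)
    | cons c t' =>
      rw [svRep] at hpre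
      by_cases hp : List.isPrefixOf (h :: k') (c :: t') = true
      · rw [if_pos hp, List.cons_append, List.cons_prefix_cons] at hpre
        exact absurd hpre.1 ha
      · rw [if_neg hp, List.cons_prefix_cons] at hpre
        obtain ⟨rfl, htail⟩ := hpre
        exact List.cons_prefix_cons.mpr ⟨rfl, ih (fun c hc => hq c (by simp [hc])) t' htail⟩

theorem svScan_eq_three (s : List Char) :
    svRep ['S','h','i','v','a','y','a'] ['S','h','i','v','a','a','y','a']
      (svRep ['N','a','m','a','h'] ['N','a','a','m','a','h']
        (svRep ['O','m'] ['O','o','m'] s)) = svScan s := by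
  induction s using svScan.induct with
  | case1 => simp [svRep, svScan]
  | case2 c t hOm ih =>
    obtain ⟨rfl, t₂, rfl⟩ : c = 'O' ∧ ∃ t₂, t = 'm' :: t₂ := by
      have h := List.isPrefixOf_iff_prefix.mp hOm
      rw [List.cons_prefix_cons] at h
      obtain ⟨rfl, h2⟩ := h
      cases t with
      | nil => exact absurd h2.length_le (by simp)
      | cons b t₂ =>
        rw [List.cons_prefix_cons] at h2
        exact ⟨rfl, t₂, by rw [h2.1]⟩
    have e0 : svRep ['O','m'] ['O','o','m'] ('O' :: 'm' :: t₂)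
        = ['O','o','m'] ++ svRep ['O','m'] ['O','o','m'] t₂ := by
      rw [svRep, if_pos (by simp [List.isPrefixOf])]; simp [List.drop]
    have e1 : svRep ['N','a','m','a','h'] ['N','a','a','m','a','h']
        (['O','o','m'] ++ svRep ['O','m'] ['O','o','m'] t₂)
        = ['O','o','m'] ++ svRep ['N','a','m','a','h'] ['N','a','a','m','a','h']
            (svRep ['O','m'] ['O','o','m'] t₂) :=
      svRep_append 'N' _ _ _ _ (by simp)
    have e2 := svRep_append 'S' ['h','i','v','a','y','a'] ['S','h','i','v','a','a','y','a']
      ['O','o','m'] (svRep ['N','a','m','a','h'] ['N','a','a','m','a','h']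
        (svRep ['O','m'] ['O','o','m'] t₂)) (by simp)
    rw [e0, e1, e2]
    simp only [List.drop] at ih
    rw [ih, svScan, if_pos hOm]
    simp [List.drop]
  | case3 c t hOm hNa ih =>
    obtain ⟨rfl, t₅, rfl⟩ : c = 'N' ∧ ∃ t₅, t = 'a' :: 'm' :: 'a' :: 'h' :: t₅ := by
      have h := List.isPrefixOf_iff_prefix.mp hNa
      rw [List.cons_prefix_cons] at h
      obtain ⟨rfl, h2⟩ := h
      obtain ⟨u, rfl⟩ := h2
      exact ⟨rfl, u, rfl⟩
    have e0 : svRep ['O','m'] ['O','o','m'] ('N'::'a'::'m'::'a'::'h':: t₅)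
        = ['N','a','m','a','h'] ++ svRep ['O','m'] ['O','o','m'] t₅ := by
      simpa using svRep_append 'O' ['m'] ['O','o','m'] ['N','a','m','a','h'] t₅ (by simp)
    have e1 : svRep ['N','a','m','a','h'] ['N','a','a','m','a','h']
        (['N','a','m','a','h'] ++ svRep ['O','m'] ['O','o','m'] t₅)
        = ['N','a','a','m','a','h'] ++ svRep ['N','a','m','a','h'] ['N','a','a','m','a','h']
            (svRep ['O','m'] ['O','o','m'] t₅) := by
      rw [List.cons_append, svRep, if_pos (by simp [List.isPrefixOf])]
      simp [List.drop]
    have e2 := svRep_append 'S' ['h','i','v','a','y','a'] ['S','h','i','v','a','a','y','a']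
      ['N','a','a','m','a','h'] (svRep ['N','a','m','a','h'] ['N','a','a','m','a','h']
        (svRep ['O','m'] ['O','o','m'] t₅)) (by simp)
    rw [e0, e1, e2]
    simp only [List.drop] at ih
    rw [ih, svScan, if_neg hOm, if_pos hNa]
    simp [List.drop]
  | case4 c t hOm hNa hSh ih =>
    obtain ⟨rfl, t₇, rfl⟩ : c = 'S' ∧ ∃ t₇, t = 'h'::'i'::'v'::'a'::'y'::'a':: t₇ := by
      have h := List.isPrefixOf_iff_prefix.mp hSh
      rw [List.cons_prefix_cons] at h
      obtain ⟨rfl, h2⟩ := h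
      obtain ⟨u, rfl⟩ := h2
      exact ⟨rfl, u, rfl⟩
    have e0 : svRep ['O','m'] ['O','o','m'] ('S'::'h'::'i'::'v'::'a'::'y'::'a':: t₇)
        = ['S','h','i','v','a','y','a'] ++ svRep ['O','m'] ['O','o','m'] t₇ := by
      simpa using svRep_append 'O' ['m'] ['O','o','m'] ['S','h','i','v','a','y','a'] t₇ (by simp)
    have e1 : svRep ['N','a','m','a','h'] ['N','a','a','m','a','h']
        (['S','h','i','v','a','y','a'] ++ svRep ['O','m'] ['O','o','m'] t₇)
        = ['S','h','i','v','a','y','a'] ++ svRep ['N','a','m','a','h'] ['N','a','a','m','a','h']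
            (svRep ['O','m'] ['O','o','m'] t₇) :=
      svRep_append 'N' _ _ _ _ (by simp)
    have e2 : svRep ['S','h','i','v','a','y','a'] ['S','h','i','v','a','a','y','a']
        (['S','h','i','v','a','y','a'] ++ svRep ['N','a','m','a','h'] ['N','a','a','m','a','h']
          (svRep ['O','m'] ['O','o','m'] t₇))
        = ['S','h','i','v','a','a','y','a'] ++ svRep ['S','h','i','v','a','y','a'] ['S','h','i','v','a','a','y','a']
            (svRep ['N','a','m','a','h'] ['N','a','a','m','a','h'] (svRep ['O','m'] ['O','o','m'] t₇)) := by
      rw [List.cons_append, svRep, if_pos (by simp [List.isPrefixOf])]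
      simp [List.drop]
    rw [e0, e1, e2]
    simp only [List.drop] at ih
    rw [ih, svScan, if_neg hOm, if_neg hNa, if_pos hSh]
    simp [List.drop]
  | case5 c t hOm hNa hSh ih =>
    have a0 : svRep ['O','m'] ['O','o','m'] (c :: t) = c :: svRep ['O','m'] ['O','o','m'] t := by
      rw [svRep, if_neg hOm]
    have a1 : svRep ['N','a','m','a','h'] ['N','a','a','m','a','h']
        (c :: svRep ['O','m'] ['O','o','m'] t)
        = c :: svRep ['N','a','m','a','h'] ['N','a','a','m','a','h']
            (svRep ['O','m'] ['O','o','m'] t) := by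
      rw [svRep, if_neg]
      intro hp
      have h := List.isPrefixOf_iff_prefix.mp hp
      rw [List.cons_prefix_cons] at h
      obtain ⟨rfl, h2⟩ := h
      have h3 : ['a','m','a','h'] <+: t :=
        svRep_prefix_reflect 'O' ['m'] ['o','m'] ['a','m','a','h'] (by simp) t h2
      exact hNa (List.isPrefixOf_iff_prefix.mpr (List.cons_prefix_cons.mpr ⟨rfl, h3⟩))
    have a2 : svRep ['S','h','i','v','a','y','a'] ['S','h','i','v','a','a','y','a']
        (c :: svRep ['N','a','m','a','h'] ['N','a','a','m','a','h']
          (svRep ['O','m'] ['O','o','m'] t))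
        = c :: svRep ['S','h','i','v','a','y','a'] ['S','h','i','v','a','a','y','a']
            (svRep ['N','a','m','a','h'] ['N','a','a','m','a','h']
              (svRep ['O','m'] ['O','o','m'] t)) := by
      rw [svRep, if_neg]
      intro hp
      have h := List.isPrefixOf_iff_prefix.mp hp
      rw [List.cons_prefix_cons] at h
      obtain ⟨rfl, h2⟩ := h
      have h3 : ['h','i','v','a','y','a'] <+: svRep ['O','m'] ['O','o','m'] t :=
        svRep_prefix_reflect 'N' ['a','m','a','h'] ['a','a','m','a','h']
          ['h','i','v','a','y','a'] (by simp) _ h2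
      have h4 : ['h','i','v','a','y','a'] <+: t :=
        svRep_prefix_reflect 'O' ['m'] ['o','m'] ['h','i','v','a','y','a'] (by simp) t h3
      exact hSh (List.isPrefixOf_iff_prefix.mpr (List.cons_prefix_cons.mpr ⟨rfl, h4⟩))
    rw [a0, a1, a2, ih, svScan, if_neg hOm, if_neg hNa, if_neg hSh]

theorem stretch_vowels_spec : Claim_equal_stretch_vowels := by
  intro text _
  unfold Spec_stretch_vowels stretch_vowels stretch_vowels_alt
  show PySem.Str.replace (PySem.Str.replace (PySem.Str.replace text "Om" "Oom")
      "Namah" "Naamah") "Shivaya" "Shivaaya" = String.ofList (svScan text.toList)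
  simp only [PySem.Str.replace, String.toList_ofList]
  congr 1
  rw [svRep_eq_replace _ _ _ (by simp), svRep_eq_replace _ _ _ (by simp),
    svRep_eq_replace _ _ _ (by simp)]
  show svRep "Shivaya".toList "Shivaaya".toList (svRep "Namah".toList "Naamah".toList
    (svRep "Om".toList "Oom".toList text.toList)) = svScan text.toList
  have h1 : "Om".toList = ['O','m'] := rfl
  have h2 : "Oom".toList = ['O','o','m'] := rfl
  have h3 : "Namah".toList = ['N','a','m','a','h'] := rfl
  have h4 : "Naamah".toList = ['N','a','a','m','a','h'] := rfl
  have h5 : "Shivaya".toList = ['S','h','i','v','a','y','a'] := rfl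
  have h6 : "Shivaaya".toList = ['S','h','i','v','a','a','y','a'] := rfl
  rw [h1, h2, h3, h4, h5, h6]
  exact svScan_eq_three text.toList
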